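-- pv_equiv track=rewrite | github.com/mitsuo0114/competitive_programming | python/atcoder/CODE FESTIVAL 2018/C.py | solve
-- ===== SOURCE A (Python) =====
-- import bisect
--
-- def solve(N, ABs, M, Ts):
--     ABs = sorted(ABs)
--     As = [ab[0] for ab in ABs]
--
--     ans = []
--     for t in Ts:
--         i = bisect.bisect_right(As, t)
--         if i > 0:
--             i -= 1
--         tans = ABs[i][1] + max(0, (t - ABs[i][0]))
--         if i + 1 < N:
--             tans = min(tans,ABs[i+1][1] + max(0, (t - ABs[i+1][0])))
--         ans.append(tans)
--     return "\n".join(str(a) for a in ans)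
-- ===== SOURCE B (Python) =====
-- def solve(N, ABs, M, Ts):
--     # Offline sweep: sort the queries, advance one pointer over the sorted ABs
--     # instead of an independent binary search per query; answers are stored at
--     # each query's original position and joined at the end.
--     ABs = sorted(ABs)
--     As = [ab[0] for ab in ABs]
--     res = [None] * len(Ts)
--     p = 0
--     for t, j in sorted((t, j) for j, t in enumerate(Ts)):
--         while p < len(As) and As[p] <= t:
--             p += 1
--         i = p - 1 if p > 0 else 0
--         tans = ABs[i][1] + max(0, t - ABs[i][0])
--         if i + 1 < N:
--             tans = min(tans, ABs[i + 1][1] + max(0, t - ABs[i + 1][0]))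
--         res[j] = tans
--     return "\n".join(str(a) for a in res)
-- ===== Notes on version B (the rewrite author's own statement) =====
-- stated objective: alternative
-- what changed: Replaces A's independent bisect_right per query with an offline sweep: queries are sorted with their original indices, a single pointer advances monotonically over the sorted intervals, and answers are written back to each query's original position.
import Mathlib
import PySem

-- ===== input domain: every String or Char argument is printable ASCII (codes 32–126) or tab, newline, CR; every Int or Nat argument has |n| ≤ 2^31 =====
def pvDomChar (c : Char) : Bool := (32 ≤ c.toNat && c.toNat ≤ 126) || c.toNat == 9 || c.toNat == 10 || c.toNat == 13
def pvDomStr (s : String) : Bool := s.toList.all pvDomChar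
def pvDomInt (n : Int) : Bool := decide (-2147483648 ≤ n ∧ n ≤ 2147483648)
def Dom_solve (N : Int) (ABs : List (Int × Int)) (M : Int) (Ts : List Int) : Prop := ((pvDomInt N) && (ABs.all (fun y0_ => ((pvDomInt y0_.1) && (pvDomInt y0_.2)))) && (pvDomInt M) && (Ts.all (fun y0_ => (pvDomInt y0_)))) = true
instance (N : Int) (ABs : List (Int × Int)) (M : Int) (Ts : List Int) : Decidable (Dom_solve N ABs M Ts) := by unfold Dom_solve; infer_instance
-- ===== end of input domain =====

-- B replaces A's per-query bisect by an offline sweep: queries are sorted and one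
-- pointer advances over the sorted intervals; answers are written back to the
-- queries' original positions (objective: alternative — same asymptotics, different algorithm).

-- ===== PORT A =====
def solve (N : Int) (ABs : List (Int × Int)) (M : Int) (Ts : List Int) : String :=
  let S := PySem.List.sorted2 ABs (fun ab => ab.1) (fun ab => ab.2)
  let As := S.map (fun ab => ab.1)
  let ans := Ts.foldl (fun ans t =>
    let i0 := PySem.List.bisectRight As t
    let i := if 0 < i0 then i0 - 1 else i0
    let pi := PySem.List.pyGetD S (i : Int) (0, 0)
    let tans := pi.2 + max 0 (t - pi.1)
    let tans := if ((i : Int) + 1 < N) then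
        let pj := PySem.List.pyGetD S ((i : Int) + 1) (0, 0)
        min tans (pj.2 + max 0 (t - pj.1))
      else tans
    ans ++ [tans]) []
  PySem.Str.join "\n" (ans.map (fun a => PySem.Int.toStr a))

-- ===== PORT B =====
-- while p < len(As) and As[p] <= t: p += 1
def solveAdvance (As : List Int) (t : Int) (p : Nat) : Nat :=
  if h : p < As.length then
    if As[p] ≤ t then solveAdvance As t (p + 1) else p
  else p
termination_by As.length - p

-- body of B's loop over the sorted queries (state: pointer p, result list res)
def solveAltStep (N : Int) (S : List (Int × Int)) (st : Nat × List (Option Int)) (q : Int × Int) :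
    Nat × List (Option Int) :=
  let p := solveAdvance (S.map (fun ab => ab.1)) q.1 st.1
  let i := if 0 < p then p - 1 else 0
  let pi := PySem.List.pyGetD S (i : Int) (0, 0)
  let tans := pi.2 + max 0 (q.1 - pi.1)
  let tans := if ((i : Int) + 1 < N) then
      let pj := PySem.List.pyGetD S ((i : Int) + 1) (0, 0)
      min tans (pj.2 + max 0 (q.1 - pj.1))
    else tans
  (p, PySem.List.pySetD st.2 q.2 (some tans))

def solve_alt (N : Int) (ABs : List (Int × Int)) (M : Int) (Ts : List Int) : String :=
  let S := PySem.List.sorted2 ABs (fun ab => ab.1) (fun ab => ab.2)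
  let qs := PySem.List.sorted2 ((PySem.List.enumerate Ts).map (fun jt => (jt.2, jt.1)))
              (fun q => q.1) (fun q => q.2)
  let st := qs.foldl (solveAltStep N S) (0, List.replicate Ts.length (none : Option Int))
  PySem.Str.join "\n" (st.2.map (fun o => match o with
    | some v => PySem.Int.toStr v
    | none => "None"))

-- ===== PRECONDITION & SPEC =====
-- Pre_ excludes exactly the inputs on which the Python A raises IndexError: a query with
-- an empty ABs, or a query whose clamped bisect index i has i+1 < N but i+1 out of range.
-- (The count of pairs with first component ≤ t is what bisect_right computes on the sorted list.)
def Pre_solve (N : Int) (ABs : List (Int × Int)) (M : Int) (Ts : List Int) : Prop :=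
  ∀ t ∈ Ts, ABs ≠ [] ∧
    (let c := ABs.countP (fun p => p.1 ≤ t)
     let i := if 0 < c then c - 1 else c
     ((i : Int) + 1 < N → i + 1 < ABs.length))
instance (N : Int) (ABs : List (Int × Int)) (M : Int) (Ts : List Int) : Decidable (Pre_solve N ABs M Ts) := by unfold Pre_solve; infer_instance

def pvWitness_solve : Int × (List (Int × Int)) × Int × List Int := (2, [(1, 5), (3, 2)], 3, [0, 2, 4])

def Spec_solve (N : Int) (ABs : List (Int × Int)) (M : Int) (Ts : List Int) (out : String) : Prop := out = solve_alt N ABs M Ts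
instance (N : Int) (ABs : List (Int × Int)) (M : Int) (Ts : List Int) (out : String) : Decidable (Spec_solve N ABs M Ts out) := by unfold Spec_solve; infer_instance

-- ===== CLAIM (what is proved, stated in full; the proofs are below) =====
def Claim_equal_solve : Prop := ∀ (N : Int) (ABs : List (Int × Int)) (M : Int) (Ts : List Int), Dom_solve N ABs M Ts → Pre_solve N ABs M Ts → Spec_solve N ABs M Ts (solve N ABs M Ts)

-- ===== LEMMAS AND PROOFS =====

-- the per-query answer, expressed through bisectRight on the sorted list
def ansAt (N : Int) (S : List (Int × Int)) (t : Int) : Int :=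
  let c := PySem.List.bisectRight (S.map (fun ab => ab.1)) t
  let i := if 0 < c then c - 1 else c
  let pi := PySem.List.pyGetD S (i : Int) (0, 0)
  let t1 := pi.2 + max 0 (t - pi.1)
  if ((i : Int) + 1 < N) then
    let pj := PySem.List.pyGetD S ((i : Int) + 1) (0, 0)
    min t1 (pj.2 + max 0 (t - pj.1))
  else t1

lemma pairwise_insertBy_le {α : Type} (key : α → Int) (before : α → α → Bool)
    (h1 : ∀ a b, before a b = true → key a ≤ key b)
    (h2 : ∀ a b, before a b = false → key b ≤ key a)
    (x : α) (acc : List α) (hacc : acc.Pairwise (fun a b => key a ≤ key b)) :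
    (PySem.List.insertBy before x acc).Pairwise (fun a b => key a ≤ key b) := by
  induction acc with
  | nil => simp [PySem.List.insertBy]
  | cons y ys ih =>
    rw [List.pairwise_cons] at hacc
    simp only [PySem.List.insertBy]
    by_cases hb : before x y = true
    · simp only [hb, if_pos]
      refine List.Pairwise.cons ?_ (List.Pairwise.cons hacc.1 hacc.2)
      intro z hz
      rcases List.mem_cons.1 hz with rfl | hz
      · exact h1 _ _ hb
      · exact le_trans (h1 _ _ hb) (hacc.1 z hz)
    · simp only [hb]
      refine List.Pairwise.cons ?_ (ih hacc.2)
      intro z hz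
      rcases (PySem.List.mem_insertBy before x z ys).1 hz with rfl | hz
      · exact h2 _ _ (by simpa using hb)
      · exact hacc.1 z hz

lemma sorted2_pairwise_fst {α : Type} (xs : List α) (k1 k2 : α → Int) :
    (PySem.List.sorted2 xs k1 k2 false).Pairwise (fun a b => k1 a ≤ k1 b) := by
  unfold PySem.List.sorted2
  simp only [if_neg (by simp : ¬ (false = true))]
  suffices h : ∀ acc : List α, acc.Pairwise (fun a b => k1 a ≤ k1 b) →
      (xs.foldl (fun acc x => PySem.List.insertBy
        (fun a b => decide (k1 a < k1 b) || !decide (k1 b < k1 a) && decide (k2 a < k2 b)) x acc) acc).Pairwise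
        (fun a b => k1 a ≤ k1 b) from h [] (by simp)
  induction xs with
  | nil => intro acc hacc; simpa using hacc
  | cons x xs ih =>
    intro acc hacc
    simp only [List.foldl_cons]
    refine ih _ (pairwise_insertBy_le k1 _ ?_ ?_ x acc hacc)
    · intro a b hab
      simp only [Bool.or_eq_true, Bool.and_eq_true, Bool.not_eq_true', decide_eq_true_eq,
        decide_eq_false_iff_not] at hab
      rcases hab with h | ⟨h, _⟩
      · exact le_of_lt h
      · exact le_of_not_gt h
    · intro a b hab
      simp only [Bool.or_eq_false_iff, Bool.and_eq_false_iff, Bool.not_eq_false',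
        decide_eq_false_iff_not, decide_eq_true_eq] at hab
      exact le_of_not_gt hab.1

lemma bisect_unique (As : List Int) (t : Int) (hs : As.Pairwise (· ≤ ·)) (p : Nat)
    (hple : p ≤ As.length)
    (hlo : ∀ j (hj : j < As.length), j < p → As[j] ≤ t)
    (hhi : ∀ j (hj : j < As.length), p ≤ j → t < As[j]) :
    p = PySem.List.bisectRight As t := by
  obtain ⟨hb1, hb2, hb3⟩ := PySem.List.bisectRight_spec As t hs
  set b := PySem.List.bisectRight As t with hbdef
  rcases lt_trichotomy p b with h | h | h
  · have hp : p < As.length := lt_of_lt_of_le h hb1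
    exact absurd (hb2 p hp h) (not_le.2 (hhi p hp le_rfl))
  · exact h
  · have hbl : b < As.length := lt_of_lt_of_le h hple
    exact absurd (hlo b hbl h) (not_le.2 (hb3 b hbl le_rfl))

lemma advance_eq_bisect (As : List Int) (t : Int) (hs : As.Pairwise (· ≤ ·)) (p : Nat)
    (hple : p ≤ As.length)
    (hlo : ∀ j (hj : j < As.length), j < p → As[j] ≤ t) :
    solveAdvance As t p = PySem.List.bisectRight As t := by
  rw [solveAdvance]
  by_cases h : p < As.length
  · rw [dif_pos h]
    by_cases hle : As[p] ≤ t
    · rw [if_pos hle]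
      exact advance_eq_bisect As t hs (p + 1) h (by
        intro j hj hjp
        rcases Nat.lt_succ_iff_lt_or_eq.1 hjp with hjp | rfl
        · exact hlo j hj hjp
        · exact hle)
    · rw [if_neg hle]
      refine bisect_unique As t hs p hple hlo ?_
      intro j hj hpj
      have hmono : As[p] ≤ As[j] := by
        rcases Nat.lt_or_ge p j with hpj' | hpj'
        · exact (List.pairwise_iff_getElem.1 hs) p j h hj hpj'
        · have : p = j := le_antisymm hpj (by omega)
          subst this; exact le_rfl
      exact lt_of_lt_of_le (not_le.1 hle) hmono
  · rw [dif_neg h]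
    refine bisect_unique As t hs p hple hlo ?_
    intro j hj hpj
    omega
termination_by As.length - p

lemma fold_snd (N : Int) (S : List (Int × Int)) (hs : (S.map (fun ab => ab.1)).Pairwise (· ≤ ·))
    (qs : List (Int × Int)) (hq : qs.Pairwise (fun a b => a.1 ≤ b.1))
    (p0 : Nat) (res : List (Option Int)) (hple : p0 ≤ S.length)
    (hlo : ∀ q ∈ qs, ∀ j (hj : j < (S.map (fun ab => ab.1)).length), j < p0 → (S.map (fun ab => ab.1))[j] ≤ q.1) :
    (qs.foldl (solveAltStep N S) (p0, res)).2 =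
      qs.foldl (fun r q => PySem.List.pySetD r q.2 (some (ansAt N S q.1))) res := by
  induction qs generalizing p0 res with
  | nil => rfl
  | cons q qs ih =>
    rw [List.pairwise_cons] at hq
    have hlen : (S.map (fun ab => ab.1)).length = S.length := by simp
    have hadv : solveAdvance (S.map (fun ab => ab.1)) q.1 p0 =
        PySem.List.bisectRight (S.map (fun ab => ab.1)) q.1 :=
      advance_eq_bisect _ _ hs p0 (by omega) (hlo q (List.mem_cons_self))
    obtain ⟨hb1, hb2, hb3⟩ := PySem.List.bisectRight_spec (S.map (fun ab => ab.1)) q.1 hs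
    set b := PySem.List.bisectRight (S.map (fun ab => ab.1)) q.1 with hbdef
    have hstep : solveAltStep N S (p0, res) q =
        (b, PySem.List.pySetD res q.2 (some (ansAt N S q.1))) := by
      have hi : (if 0 < b then b - 1 else (0 : Nat)) = (if 0 < b then b - 1 else b) := by
        split_ifs <;> omega
      simp only [solveAltStep, hadv, ansAt, ← hbdef, hi]
    simp only [List.foldl_cons, hstep]
    exact ih hq.2 b _ (by omega) (by
      intro q' hq' j hj hjb
      exact le_trans (hb2 j hj hjb) (hq.1 q' hq'))

lemma foldl_set_length (g : Int × Int → Option Int) (qs : List (Int × Int)) (res : List (Option Int)) :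
    (qs.foldl (fun r q => PySem.List.pySetD r q.2 (g q)) res).length = res.length := by
  induction qs generalizing res with
  | nil => rfl
  | cons q qs ih => simp [List.foldl_cons, ih, PySem.List.length_pySetD]

lemma foldl_set_getElem? (g : Int → Int) (Ts : List Int) (qs : List (Int × Int))
    (h : ∀ q ∈ qs, ∃ k : Nat, ∃ hk : k < Ts.length, q.1 = Ts[k] ∧ q.2 = (k : Int))
    (res : List (Option Int)) (hlen : res.length = Ts.length) (m : Nat) (hm : m < Ts.length) :
    (qs.foldl (fun r q => PySem.List.pySetD r q.2 (some (g q.1))) res)[m]? =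
      if ((m : Int) ∈ qs.map (fun q => q.2)) then some (some (g Ts[m])) else res[m]? := by
  induction qs generalizing res with
  | nil => simp
  | cons q qs ih =>
    obtain ⟨k, hk, hq1, hq2⟩ := h q List.mem_cons_self
    have hset : PySem.List.pySetD res q.2 (some (g q.1)) = res.set k (some (g q.1)) := by
      rw [hq2, PySem.List.pySetD_natCast]
    rw [List.foldl_cons, ih (fun q' hq' => h q' (List.mem_cons_of_mem _ hq'))
      (PySem.List.pySetD res q.2 (some (g q.1))) (by rw [hset]; simpa using hlen)]
    simp only [List.map_cons, List.mem_cons, hq2]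
    by_cases hmem : (m : Int) ∈ qs.map (fun q => q.2)
    · simp [hmem]
    · simp only [hmem, if_false, or_false]
      by_cases hmk : m = k
      · subst hmk
        rw [if_pos (by simp), PySem.List.pySetD_natCast, List.getElem?_set_self (by omega), hq1]
      · rw [if_neg (by simpa using fun hh => hmk (by exact_mod_cast hh)),
          PySem.List.pySetD_natCast, List.getElem?_set_ne (by omega)]

-- the main unconditional equality of the two ports
lemma solve_eq_alt (N : Int) (ABs : List (Int × Int)) (M : Int) (Ts : List Int) :
    solve N ABs M Ts = solve_alt N ABs M Ts := by
  have hS : solve N ABs M Ts = PySem.Str.join "\n"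
      ((Ts.map (ansAt N (PySem.List.sorted2 ABs (fun ab => ab.1) (fun ab => ab.2)))).map
        (fun a => PySem.Int.toStr a)) := by
    show PySem.Str.join "\n"
        ((Ts.foldl (fun ans t => ans ++
          [ansAt N (PySem.List.sorted2 ABs (fun ab => ab.1) (fun ab => ab.2)) t]) []).map
          (fun a => PySem.Int.toStr a)) = _
    rw [PySem.List.foldl_append_singleton_eq_map]
    rfl
  set S := PySem.List.sorted2 ABs (fun ab => ab.1) (fun ab => ab.2) with hSdef
  set qs := PySem.List.sorted2 ((PySem.List.enumerate Ts).map (fun jt => (jt.2, jt.1)))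
      (fun q => q.1) (fun q => q.2) with hqsdef
  have hs : (S.map (fun ab => ab.1)).Pairwise (· ≤ ·) :=
    List.pairwise_map.2 (sorted2_pairwise_fst ABs _ _)
  have hq : qs.Pairwise (fun a b => a.1 ≤ b.1) := sorted2_pairwise_fst _ _ _
  have hperm : qs.Perm ((PySem.List.enumerate Ts).map (fun jt => (jt.2, jt.1))) :=
    PySem.List.sorted2_perm _ _ _ false
  have hmemq : ∀ q ∈ qs, ∃ k : Nat, ∃ hk : k < Ts.length, q.1 = Ts[k] ∧ q.2 = (k : Int) := by
    intro q hqm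
    obtain ⟨jt, hjt, rfl⟩ := List.mem_map.1 (hperm.subset hqm)
    obtain ⟨k, hk, rfl⟩ := (PySem.List.mem_enumerate_iff Ts 0 jt).1 hjt
    exact ⟨k, hk, rfl, by simp⟩
  have hcov : ∀ m : Nat, m < Ts.length → (m : Int) ∈ qs.map (fun q => q.2) := by
    intro m hm
    refine (hperm.map (fun q => q.2)).mem_iff.2 ?_
    have h2 : ((PySem.List.enumerate Ts).map (fun jt => (jt.2, jt.1))).map (fun q => q.2) =
        (PySem.List.enumerate Ts).map (fun jt => jt.1) := by
      simp [List.map_map]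
    rw [h2, PySem.List.map_fst_enumerate]
    rw [PySem.List.mem_pyRange_one]
    omega
  have hfold : (qs.foldl (solveAltStep N S) (0, List.replicate Ts.length (none : Option Int))).2 =
      Ts.map (fun t => some (ansAt N S t)) := by
    rw [fold_snd N S hs qs hq 0 _ (by omega) (by intro q _ j hj hj0; omega)]
    apply List.ext_getElem?
    intro m
    by_cases hm : m < Ts.length
    · rw [foldl_set_getElem? (ansAt N S) Ts qs hmemq _ (by simp) m hm, if_pos (hcov m hm)]
      simp [hm]
    · have hl : (qs.foldl (fun r q => PySem.List.pySetD r q.2 (some (ansAt N S q.1)))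
          (List.replicate Ts.length (none : Option Int))).length = Ts.length := by
        rw [foldl_set_length (fun q => some (ansAt N S q.1)) qs]; simp
      rw [List.getElem?_eq_none (by omega), List.getElem?_eq_none (by simp; omega)]
  have hB : solve_alt N ABs M Ts = PySem.Str.join "\n"
      ((Ts.map (ansAt N S)).map (fun a => PySem.Int.toStr a)) := by
    show PySem.Str.join "\n"
        ((qs.foldl (solveAltStep N S) (0, List.replicate Ts.length (none : Option Int))).2.map
          (fun o => match o with | some v => PySem.Int.toStr v | none => "None")) = _
    rw [hfold]
    simp only [List.map_map]; rfl
  rw [hS, hB]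

-- ===== VERDICT (by name: the statement is the Claim_ definition above) =====
theorem solve_spec : Claim_equal_solve := by
  intro N ABs M Ts _ _
  unfold Spec_solve
  exact solve_eq_alt N ABs M Ts
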